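-- pv_equiv track=rewrite | github.com/IcameIsawIcode/binary_image_region_finder | main.py | check
-- ===== SOURCE A (Python) =====
-- def check(l, r, c, i, j):
--     # If the current cell is 0, return 0
--     if l[i][j] == 0:
--         return 0
--     else:
--         # Initialize variables to track the number of rows (`lr`) and columns (`lc`) in the square
--         lr = 0
--         lc = 0
--         lc2 = 0
--         j1 = j
--         i1 = i
--
--         # Outer loop to iterate through rows while the square is valid
--         while i < r and j < c and l[i][j] == 1:
--             # Inner loop to iterate through columns in the current row
--             while i < r and j < c and l[i][j] == 1:
--                 i += 1
--                 lc2 += 1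
--
--             # Update the minimum column count (`lc`) for the square
--             if j != j1:
--                 lc = min(lc, lc2)
--             else:
--                 lc = lc2
--
--             lr += 1
--             j += 1
--             lc2 = 0
--             i = i1
--
--         # The size of the largest square is the minimum of the row and column counts
--         ans = min(lr, lc)
--         return ans
-- ===== SOURCE B (Python) =====
-- def check(l, r, c, i, j):
--     # If the anchor cell is 0, there is no square
--     if l[i][j] == 0:
--         return 0
--     # Horizontal pass: count consecutive columns from j whose cell in row i is 1
--     L = 0
--     col = j
--     while col < c and l[i][col] == 1:
--         L += 1
--         col += 1
--     # Vertical pass: count rows from i in which the whole band of L columns is 1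
--     # (no need to look past L rows: the answer is at most L)
--     m = 0
--     row = i
--     while m < L and row < r and all(l[row][k] == 1 for k in range(j, j + L)):
--         m += 1
--         row += 1
--     return min(L, m)
-- ===== Notes on version B (the rewrite author's own statement) =====
-- stated objective: alternative
-- what changed: A runs a per-column nested loop that walks each column's full vertical run and keeps a running minimum; B makes two differently-shaped passes: one horizontal scan counting the band width L, then one row-by-row scan counting how many rows keep the whole L-wide band at 1, returning min(L, rows).
-- outside the precondition, e.g. on check([[1, 0], [0]], 2, 2, 0, 0): A returns 1, B returns 1; on check([[1], [0]], 5, 1, 0, 0): A returns 1, B returns 1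
import Mathlib
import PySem

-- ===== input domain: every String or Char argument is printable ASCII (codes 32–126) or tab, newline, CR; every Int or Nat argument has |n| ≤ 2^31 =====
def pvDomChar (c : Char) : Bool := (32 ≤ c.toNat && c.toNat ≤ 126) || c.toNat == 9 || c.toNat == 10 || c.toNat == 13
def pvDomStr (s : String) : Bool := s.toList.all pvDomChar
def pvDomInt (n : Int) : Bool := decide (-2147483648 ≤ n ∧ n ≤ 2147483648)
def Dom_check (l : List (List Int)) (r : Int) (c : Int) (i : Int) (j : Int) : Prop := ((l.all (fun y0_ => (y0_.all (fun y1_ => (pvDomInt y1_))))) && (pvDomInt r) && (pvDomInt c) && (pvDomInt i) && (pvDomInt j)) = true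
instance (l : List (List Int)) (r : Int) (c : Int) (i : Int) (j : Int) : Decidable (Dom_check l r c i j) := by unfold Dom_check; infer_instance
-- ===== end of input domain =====

-- B replaces A's per-column nested scan (full vertical run per column with a running minimum) by a
-- horizontal width pass followed by a row-by-row band pass (alternative decomposition, same cost).

-- l[a][b] (always in range under Pre_check, where the pyGetD defaults are never reached)
def pvCell (l : List (List Int)) (a b : Int) : Int :=
  PySem.List.pyGetD (PySem.List.pyGetD l a []) b 0

-- ===== PORT A =====
-- inner 'while i < r and j < c and l[i][j] == 1: i += 1; lc2 += 1', returning the final (i, lc2)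
def checkInner (l : List (List Int)) (r c j : Int) (i2 lc2 : Int) : Int × Int :=
  if i2 < r ∧ j < c ∧ pvCell l i2 j = 1 then
    checkInner l r c j (i2 + 1) (lc2 + 1)
  else (i2, lc2)
termination_by (r - i2).toNat
decreasing_by omega

-- outer 'while i < r and j < c and l[i][j] == 1' loop; i is reset to i1 at the end of each
-- iteration, so at every loop head i = i1
def checkOuter (l : List (List Int)) (r c i1 j1 : Int) (j lr lc : Int) : Int × Int :=
  if i1 < r ∧ j < c ∧ pvCell l i1 j = 1 then
    let lc2 := (checkInner l r c j i1 0).2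
    let lc' := if j ≠ j1 then min lc lc2 else lc2
    checkOuter l r c i1 j1 (j + 1) (lr + 1) lc'
  else (lr, lc)
termination_by (c - j).toNat
decreasing_by omega

def check (l : List (List Int)) (r : Int) (c : Int) (i : Int) (j : Int) : Int :=
  if pvCell l i j = 0 then 0
  else
    let p := checkOuter l r c i j j 0 0
    min p.1 p.2

-- ===== PORT B =====
-- horizontal pass: 'while col < c and l[i][col] == 1: L += 1; col += 1'
def altH (l : List (List Int)) (c i : Int) (col L : Int) : Int :=
  if col < c ∧ pvCell l i col = 1 then altH l c i (col + 1) (L + 1) else L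
termination_by (c - col).toNat
decreasing_by omega

-- all(l[row][k] == 1 for k in range(j, j + L))
def altBand (l : List (List Int)) (j L row : Int) : Bool :=
  (PySem.List.pyRange j (j + L) 1).all (fun k => pvCell l row k == 1)

-- vertical pass: 'while m < L and row < r and all(...): m += 1; row += 1'
def altV (l : List (List Int)) (r j L : Int) (row m : Int) : Int :=
  if m < L ∧ row < r ∧ altBand l j L row = true then altV l r j L (row + 1) (m + 1) else m
termination_by (L - m).toNat
decreasing_by omega

def check_alt (l : List (List Int)) (r : Int) (c : Int) (i : Int) (j : Int) : Int :=
  if pvCell l i j = 0 then 0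
  else
    let L := altH l c i j 0
    let m := altV l r j L i 0
    min L m

-- the row Python's l[i] denotes (negative i counts from the end)
def pvRow (l : List (List Int)) (a : Int) : List Int := PySem.List.pyGetD l a []

-- ===== PRECONDITION & SPEC =====
-- Pre_check excludes exactly where A can raise IndexError: the initial indices i, j must be valid
-- for l (Python wraparound included) and, whenever the scan loops can start at all, r and c must
-- stay within the grid and j be valid for every row; this is conservative — it also excludes a few
-- ragged/oversized-bound inputs where the scan happens to stop before any unsafe access (A and B
-- return identical values there too, see the cited examples).
def Pre_check (l : List (List Int)) (r : Int) (c : Int) (i : Int) (j : Int) : Prop :=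
  PySem.Raise.InRange l.length i ∧ PySem.Raise.InRange (pvRow l i).length j ∧
  (j < c ∧ pvCell l i j = 1 →
    r ≤ (l.length : Int) ∧ ∀ row ∈ l, c ≤ (row.length : Int) ∧ -(row.length : Int) ≤ j)
instance (l : List (List Int)) (r : Int) (c : Int) (i : Int) (j : Int) : Decidable (Pre_check l r c i j) := by unfold Pre_check; infer_instance

def pvWitness_check : List (List Int) × Int × Int × Int × Int := ([[1, 1, 0], [1, 1, 1], [0, 1, 1]], 3, 3, 0, 0)

def Spec_check (l : List (List Int)) (r : Int) (c : Int) (i : Int) (j : Int) (out : Int) : Prop := out = check_alt l r c i j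
instance (l : List (List Int)) (r : Int) (c : Int) (i : Int) (j : Int) (out : Int) : Decidable (Spec_check l r c i j out) := by unfold Spec_check; infer_instance

-- ===== CLAIM (what is proved, stated in full; the proofs are below) =====
def Claim_equal_check : Prop := ∀ (l : List (List Int)) (r : Int) (c : Int) (i : Int) (j : Int), Dom_check l r c i j → Pre_check l r c i j → Spec_check l r c i j (check l r c i j)

-- ===== LEMMAS AND PROOFS =====

-- proof-only helpers: accumulator-free versions of B's two counters
def hcount (l : List (List Int)) (c i : Int) (col : Int) : Int :=
  if col < c ∧ pvCell l i col = 1 then 1 + hcount l c i (col + 1) else 0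
termination_by (c - col).toNat
decreasing_by omega

def bandCount (l : List (List Int)) (r j L : Int) (row : Int) : Int :=
  if row < r ∧ altBand l j L row = true then 1 + bandCount l r j L (row + 1) else 0
termination_by (r - row).toNat
decreasing_by omega

-- the accumulator of A's inner loop just adds up
theorem checkInner_acc (l : List (List Int)) (r c j : Int) (i2 lc2 : Int) :
    (checkInner l r c j i2 lc2).2 = lc2 + (checkInner l r c j i2 0).2 := by
  have H : ∀ n i2, (r - i2).toNat = n → ∀ lc2 : Int,
      (checkInner l r c j i2 lc2).2 = lc2 + (checkInner l r c j i2 0).2 := by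
    intro n
    induction n using Nat.strong_induction_on with
    | _ n ih =>
      intro i2 hn lc2
      conv_lhs => rw [checkInner]
      conv_rhs => rw [checkInner]
      by_cases h : i2 < r ∧ j < c ∧ pvCell l i2 j = 1
      · simp only [if_pos h]
        rw [ih ((r - (i2+1)).toNat) (by omega) _ rfl (lc2+1),
            ih ((r - (i2+1)).toNat) (by omega) _ rfl (0+1)]
        ring
      · simp [h]
  exact H _ i2 rfl lc2

theorem checkInner_nonneg (l : List (List Int)) (r c j : Int) (i2 : Int) :
    0 ≤ (checkInner l r c j i2 0).2 := by
  have H : ∀ n i2, (r - i2).toNat = n → 0 ≤ (checkInner l r c j i2 0).2 := by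
    intro n
    induction n using Nat.strong_induction_on with
    | _ n ih =>
      intro i2 hn
      rw [checkInner]
      by_cases h : i2 < r ∧ j < c ∧ pvCell l i2 j = 1
      · simp only [if_pos h]
        rw [checkInner_acc]
        have := ih ((r - (i2+1)).toNat) (by omega) _ rfl
        omega
      · simp [h]
  exact H _ i2 rfl

-- A's inner count (a vertical run starting at i2 < r) never exceeds r - i2
theorem checkInner_le (l : List (List Int)) (r c j : Int) (i2 : Int) (hlt : i2 < r) :
    (checkInner l r c j i2 0).2 ≤ r - i2 := by
  have H : ∀ n i2, (r - i2).toNat = n → i2 < r → (checkInner l r c j i2 0).2 ≤ r - i2 := by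
    intro n
    induction n using Nat.strong_induction_on with
    | _ n ih =>
      intro i2 hn hlt
      rw [checkInner]
      by_cases h : i2 < r ∧ j < c ∧ pvCell l i2 j = 1
      · simp only [if_pos h]
        rw [checkInner_acc]
        by_cases h2 : i2 + 1 < r
        · have := ih ((r - (i2+1)).toNat) (by omega) _ rfl h2
          omega
        · have : (checkInner l r c j (i2+1) 0).2 = 0 := by
            rw [checkInner]; simp [h2]
          omega
      · simp [h]; omega
  exact H _ i2 rfl hlt

theorem hcount_nonneg (l : List (List Int)) (c i : Int) (col : Int) : 0 ≤ hcount l c i col := by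
  have H : ∀ n col, (c - col).toNat = n → 0 ≤ hcount l c i col := by
    intro n
    induction n using Nat.strong_induction_on with
    | _ n ih =>
      intro col hn
      rw [hcount]
      by_cases h : col < c ∧ pvCell l i col = 1
      · simp only [if_pos h]
        have := ih ((c - (col+1)).toNat) (by omega) _ rfl
        omega
      · simp [h]
  exact H _ col rfl

theorem bandCount_nonneg (l : List (List Int)) (r j L : Int) (row : Int) : 0 ≤ bandCount l r j L row := by
  have H : ∀ n row, (r - row).toNat = n → 0 ≤ bandCount l r j L row := by
    intro n
    induction n using Nat.strong_induction_on with
    | _ n ih =>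
      intro row hn
      rw [bandCount]
      by_cases h : row < r ∧ altBand l j L row = true
      · simp only [if_pos h]
        have := ih ((r - (row+1)).toNat) (by omega) _ rfl
        omega
      · simp [h]
  exact H _ row rfl

theorem altBand_zero (l : List (List Int)) (j row : Int) : altBand l j 0 row = true := by
  simp [altBand, PySem.List.pyRange]

-- on an empty band the vertical pass counts all remaining rows, so at least r - row of them
theorem bandCount_zero_ge (l : List (List Int)) (r j : Int) (row : Int) :
    r - row ≤ bandCount l r j 0 row := by
  have H : ∀ n row, (r - row).toNat = n → r - row ≤ bandCount l r j 0 row := by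
    intro n
    induction n using Nat.strong_induction_on with
    | _ n ih =>
      intro row hn
      rw [bandCount]
      by_cases h : row < r
      · simp only [if_pos (And.intro h (altBand_zero l j row))]
        have := ih ((r - (row+1)).toNat) (by omega) _ rfl
        omega
      · have : ¬ (row < r ∧ altBand l j 0 row = true) := by tauto
        simp [this]; omega
  exact H _ row rfl

theorem altBand_peel (l : List (List Int)) (j L row : Int) (hL : 1 ≤ L) :
    altBand l j L row = ((pvCell l row j == 1) && altBand l (j + 1) (L - 1) row) := by
  unfold altBand
  rw [PySem.List.pyRange_one_cons (by omega : j < j + L)]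
  have e : j + L = (j + 1) + (L - 1) := by ring
  rw [e, List.all_cons]

-- key lemma: B's band count is the min of the first column's vertical run (= A's inner count)
-- and the band count over the remaining L - 1 columns
theorem bandCount_peel (l : List (List Int)) (r c j' L : Int) (hj : j' < c) (hL : 1 ≤ L) :
    ∀ row, bandCount l r j' L row = min ((checkInner l r c j' row 0).2) (bandCount l r (j' + 1) (L - 1) row) := by
  have H : ∀ n row, (r - row).toNat = n →
      bandCount l r j' L row = min ((checkInner l r c j' row 0).2) (bandCount l r (j' + 1) (L - 1) row) := by
    intro n
    induction n using Nat.strong_induction_on with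
    | _ n ih =>
      intro row hn
      by_cases hr : row < r
      · by_cases hc : pvCell l row j' = 1
        · by_cases hb : altBand l (j' + 1) (L - 1) row = true
          · -- full band continues at this row
            conv_lhs => rw [bandCount]
            rw [if_pos (by exact ⟨hr, by rw [altBand_peel l j' L row hL]; simp [hc, hb]⟩)]
            conv_rhs => rw [bandCount, checkInner]
            rw [if_pos ⟨hr, hj, hc⟩, if_pos ⟨hr, hb⟩, checkInner_acc]
            rw [ih ((r - (row+1)).toNat) (by omega) _ rfl]
            omega
          · -- rest of band fails at this row
            conv_lhs => rw [bandCount]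
            rw [if_neg (by rw [altBand_peel l j' L row hL]; simp [hb])]
            conv_rhs => rw [bandCount]
            rw [if_neg (by simp [hb])]
            have := checkInner_nonneg l r c j' row
            omega
        · -- first column fails at this row
          conv_lhs => rw [bandCount]
          rw [if_neg (by rw [altBand_peel l j' L row hL]; simp [hc])]
          conv_rhs => rw [checkInner]
          rw [if_neg (by tauto)]
          have := bandCount_nonneg l r (j' + 1) (L - 1) row
          simp; omega
      · conv_lhs => rw [bandCount]
        rw [if_neg (by tauto)]
        conv_rhs => rw [bandCount, checkInner]
        rw [if_neg (by tauto), if_neg (by tauto)]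
        simp
  exact fun row => H _ row rfl

-- A's outer loop, from any column right of the first, computes B's two passes
theorem checkOuter_eq (l : List (List Int)) (r c i1 j1 : Int) (hi : i1 < r) :
    ∀ j' lr lc, j1 < j' → 0 ≤ lc → lc ≤ r - i1 →
    checkOuter l r c i1 j1 j' lr lc
      = (lr + hcount l c i1 j', min lc (bandCount l r j' (hcount l c i1 j') i1)) := by
  have H : ∀ n j', (c - j').toNat = n → ∀ lr lc, j1 < j' → 0 ≤ lc → lc ≤ r - i1 →
      checkOuter l r c i1 j1 j' lr lc
        = (lr + hcount l c i1 j', min lc (bandCount l r j' (hcount l c i1 j') i1)) := by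
    intro n
    induction n using Nat.strong_induction_on with
    | _ n ih =>
      intro j' hn lr lc hj1 hlc0 hlcr
      by_cases h : j' < c ∧ pvCell l i1 j' = 1
      · have hv0 := checkInner_nonneg l r c j' i1
        have hvr := checkInner_le l r c j' i1 hi
        conv_lhs => rw [checkOuter]
        rw [if_pos ⟨hi, h.1, h.2⟩]
        simp only [if_pos (by omega : j' ≠ j1)]
        rw [ih ((c - (j'+1)).toNat) (by omega) _ rfl _ _ (by omega) (by omega) (by omega)]
        have hH : hcount l c i1 j' = 1 + hcount l c i1 (j' + 1) := by
          rw [hcount]; simp [h]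
        have hH0 := hcount_nonneg l c i1 (j' + 1)
        rw [hH, bandCount_peel l r c j' (1 + hcount l c i1 (j' + 1)) h.1 (by omega) i1]
        have e : 1 + hcount l c i1 (j' + 1) - 1 = hcount l c i1 (j' + 1) := by ring
        rw [e]
        simp only [Prod.mk.injEq]
        exact ⟨by omega, by omega⟩
      · conv_lhs => rw [checkOuter]
        rw [if_neg (by tauto)]
        have hH : hcount l c i1 j' = 0 := by
          rw [hcount]; simp [h]
        rw [hH]
        have := bandCount_zero_ge l r j' i1
        simp only [Prod.mk.injEq]
        exact ⟨by omega, by omega⟩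
  exact fun j' lr lc => H _ j' rfl lr lc

-- B's horizontal loop accumulator just adds up
theorem altH_acc (l : List (List Int)) (c i : Int) (col L : Int) :
    altH l c i col L = L + hcount l c i col := by
  have H : ∀ n col, (c - col).toNat = n → ∀ L : Int,
      altH l c i col L = L + hcount l c i col := by
    intro n
    induction n using Nat.strong_induction_on with
    | _ n ih =>
      intro col hn L
      conv_lhs => rw [altH]
      conv_rhs => rw [hcount]
      by_cases h : col < c ∧ pvCell l i col = 1
      · simp only [if_pos h]
        rw [ih ((c - (col+1)).toNat) (by omega) _ rfl (L+1)]
        ring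
      · simp [h]
  exact H _ col rfl L

-- B's capped vertical loop counts min(L - m, full band count) more rows
theorem altV_eq (l : List (List Int)) (r j L : Int) (row m : Int) (hm : 0 ≤ L - m) :
    altV l r j L row m = m + min (L - m) (bandCount l r j L row) := by
  have H : ∀ n row, (r - row).toNat = n → ∀ m : Int, 0 ≤ L - m →
      altV l r j L row m = m + min (L - m) (bandCount l r j L row) := by
    intro n
    induction n using Nat.strong_induction_on with
    | _ n ih =>
      intro row hn m hm
      conv_lhs => rw [altV]
      by_cases h : m < L ∧ row < r ∧ altBand l j L row = true
      · simp only [if_pos h]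
        rw [ih ((r - (row+1)).toNat) (by omega) _ rfl (m+1) (by omega)]
        have hbc : bandCount l r j L row = 1 + bandCount l r j L (row+1) := by
          rw [bandCount, if_pos (And.intro h.2.1 h.2.2)]
        have := bandCount_nonneg l r j L (row+1)
        omega
      · simp only [if_neg h]
        by_cases hml : m < L
        · have hb : ¬ (row < r ∧ altBand l j L row = true) := by tauto
          have hbc : bandCount l r j L row = 0 := by rw [bandCount, if_neg hb]
          omega
        · have := bandCount_nonneg l r j L row
          omega
  exact H _ row rfl m hm

-- the two programs agree on every input (the Lean ports are total)
theorem check_eq_alt (l : List (List Int)) (r c i j : Int) :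
    check l r c i j = check_alt l r c i j := by
  unfold check check_alt
  by_cases h0 : pvCell l i j = 0
  · simp [h0]
  · simp only [if_neg h0]
    have hLa : altH l c i j 0 = hcount l c i j := by rw [altH_acc]; ring
    have hL0 := hcount_nonneg l c i j
    rw [hLa, altV_eq l r j (hcount l c i j) i 0 (by omega)]
    have hred : (0:Int) + min (hcount l c i j - 0) (bandCount l r j (hcount l c i j) i)
        = min (hcount l c i j) (bandCount l r j (hcount l c i j) i) := by omega
    rw [hred]
    by_cases hcond : i < r ∧ j < c ∧ pvCell l i j = 1
    · obtain ⟨hir, hjc, h1⟩ := hcond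
      have hv0 := checkInner_nonneg l r c j i
      have hvr := checkInner_le l r c j i hir
      conv_lhs => rw [checkOuter]
      rw [if_pos ⟨hir, hjc, h1⟩]
      simp only [ne_eq, not_true_eq_false, if_false]
      rw [checkOuter_eq l r c i j hir (j + 1) (0 + 1) _ (by omega) hv0 hvr]
      have hH : hcount l c i j = 1 + hcount l c i (j + 1) := by
        rw [hcount]; simp [hjc, h1]
      have hH0 := hcount_nonneg l c i (j + 1)
      rw [hH, bandCount_peel l r c j (1 + hcount l c i (j + 1)) hjc (by omega) i]
      have e : 1 + hcount l c i (j + 1) - 1 = hcount l c i (j + 1) := by ring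
      rw [e]; norm_num
    · conv_lhs => rw [checkOuter]
      rw [if_neg hcond]
      by_cases h2 : j < c ∧ pvCell l i j = 1
      · have hir : ¬ i < r := by tauto
        have hm : bandCount l r j (hcount l c i j) i = 0 := by
          rw [bandCount]; simp [hir]
        rw [hm]
        have := hcount_nonneg l c i j
        simp; omega
      · have hL : hcount l c i j = 0 := by
          rw [hcount]; rw [if_neg h2]
        rw [hL]
        have := bandCount_nonneg l r j 0 i
        simp; omega

-- ===== VERDICT (by name: the statement is the Claim_ definition above) =====
theorem check_spec : Claim_equal_check := by
  intro l r c i j _dom _hpre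
  exact check_eq_alt l r c i j
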